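-- pv_equiv track=rewrite | github.com/iv4n002/python2 | 40.py | eliminarcapicua
-- ===== SOURCE A (Python) =====
-- def eliminarcapicua(llista):
--
--     if len(llista) <= 2:
--         return llista
--
--     elif llista[0] == llista[-1]:
--         return eliminarcapicua(llista[1:-1])
--
--     else:
--         nova_llista = [llista[0]] + eliminarcapicua(llista[1:-1]) + [llista[-1]]
--         return nova_llista
-- ===== SOURCE B (Python) =====
-- def eliminarcapicua(llista):
--     i, j = 0, len(llista) - 1
--     left, right = [], []
--     while j - i >= 2:
--         if llista[i] != llista[j]:
--             left.append(llista[i])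
--             right.append(llista[j])
--         i += 1
--         j -= 1
--     return left + llista[i:j + 1] + right[::-1]
-- ===== Notes on version B (the rewrite author's own statement) =====
-- stated objective: faster
-- what changed: Replaces A's recursion that copies the list slice llista[1:-1] at every level (quadratic copying) with a single two-pointer pass from both ends that collects kept left/right elements and the untouched middle.
import Mathlib
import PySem

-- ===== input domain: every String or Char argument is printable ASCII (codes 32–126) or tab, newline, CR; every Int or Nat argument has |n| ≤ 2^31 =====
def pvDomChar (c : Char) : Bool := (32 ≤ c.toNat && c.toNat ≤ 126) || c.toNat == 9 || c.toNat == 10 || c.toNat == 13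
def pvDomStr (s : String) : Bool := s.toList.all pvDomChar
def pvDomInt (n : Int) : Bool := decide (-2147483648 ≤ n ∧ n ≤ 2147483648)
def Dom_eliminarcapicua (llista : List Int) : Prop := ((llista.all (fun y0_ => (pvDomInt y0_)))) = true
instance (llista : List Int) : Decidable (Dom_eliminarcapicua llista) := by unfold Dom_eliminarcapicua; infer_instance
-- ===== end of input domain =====

-- B replaces A's slice-copying recursion by a single two-pointer pass (objective: faster).

-- termination measures of the two ports (named so the ports' compiled terms stay small)
theorem pvDecA (llista : List Int) (h : ¬ llista.length ≤ 2) :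
    (PySem.List.slice llista (some 1) (some (-1))).length < llista.length := by
  simp [PySem.List.length_slice]
  omega

theorem pvDecB {i j : Int} (h : 2 ≤ j - i) : (j - 1 - (i + 1)).toNat < (j - i).toNat := by
  omega

-- ===== PORT A =====
-- llista[0] / llista[-1] are in range in the branches that read them (length ≥ 3), so `.getD 0` is exact there.
def eliminarcapicua (llista : List Int) : List Int :=
  if llista.length ≤ 2 then llista
  else if (PySem.List.pyGet? llista 0).getD 0 = (PySem.List.pyGet? llista (-1)).getD 0 then
    eliminarcapicua (PySem.List.slice llista (some 1) (some (-1)))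
  else
    [(PySem.List.pyGet? llista 0).getD 0]
      ++ eliminarcapicua (PySem.List.slice llista (some 1) (some (-1)))
      ++ [(PySem.List.pyGet? llista (-1)).getD 0]
termination_by llista.length
decreasing_by
  all_goals exact pvDecA llista (by assumption)

-- ===== PORT B =====
-- the while loop of Source B; llista[i] / llista[j] are in range whenever the body runs (0 ≤ i, i + 2 ≤ j < len), so `.getD 0` is exact.
def elimLoop (llista : List Int) (i j : Int) (left right : List Int) :
    Int × Int × List Int × List Int :=
  if 2 ≤ j - i then
    if (PySem.List.pyGet? llista i).getD 0 ≠ (PySem.List.pyGet? llista j).getD 0 then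
      elimLoop llista (i + 1) (j - 1) (left ++ [(PySem.List.pyGet? llista i).getD 0])
        (right ++ [(PySem.List.pyGet? llista j).getD 0])
    else
      elimLoop llista (i + 1) (j - 1) left right
  else (i, j, left, right)
termination_by (j - i).toNat
decreasing_by all_goals exact pvDecB (by assumption)

def eliminarcapicua_alt (llista : List Int) : List Int :=
  let r := elimLoop llista 0 ((llista.length : Int) - 1) [] []
  r.2.2.1 ++ PySem.List.slice llista (some r.1) (some (r.2.1 + 1)) ++ r.2.2.2.reverse

-- ===== PRECONDITION & SPEC =====
def Spec_eliminarcapicua (llista : List Int) (out : List Int) : Prop := out = eliminarcapicua_alt llista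
instance (llista : List Int) (out : List Int) : Decidable (Spec_eliminarcapicua llista out) := by unfold Spec_eliminarcapicua; infer_instance

-- ===== CLAIM (what is proved, stated in full; the proofs are below) =====
def Claim_equal_eliminarcapicua : Prop := ∀ (llista : List Int), Dom_eliminarcapicua llista → Spec_eliminarcapicua llista (eliminarcapicua llista)

-- ===== LEMMAS AND PROOFS =====

theorem elimLoop_stop (l : List Int) (i j : Int) (L R : List Int) (h : ¬ 2 ≤ j - i) :
    elimLoop l i j L R = (i, j, L, R) := by
  rw [elimLoop]; simp [h]

theorem elimLoop_step_ne (l : List Int) (i j : Int) (L R : List Int) (h : 2 ≤ j - i)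
    (hne : (PySem.List.pyGet? l i).getD 0 ≠ (PySem.List.pyGet? l j).getD 0) :
    elimLoop l i j L R =
      elimLoop l (i + 1) (j - 1) (L ++ [(PySem.List.pyGet? l i).getD 0])
        (R ++ [(PySem.List.pyGet? l j).getD 0]) := by
  rw [elimLoop]; simp [h, hne]

theorem elimLoop_step_eq (l : List Int) (i j : Int) (L R : List Int) (h : 2 ≤ j - i)
    (heq : (PySem.List.pyGet? l i).getD 0 = (PySem.List.pyGet? l j).getD 0) :
    elimLoop l i j L R = elimLoop l (i + 1) (j - 1) L R := by
  rw [elimLoop]; simp [h, heq]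

theorem elimLoop_acc (l : List Int) :
    ∀ (k : Nat) (i j : Int) (L R : List Int), (j - i).toNat = k →
      elimLoop l i j L R =
        ((elimLoop l i j [] []).1, (elimLoop l i j [] []).2.1,
         L ++ (elimLoop l i j [] []).2.2.1, R ++ (elimLoop l i j [] []).2.2.2) := by
  intro k
  induction k using Nat.strong_induction_on with
  | _ k ih =>
    intro i j L R hk
    by_cases h2 : 2 ≤ j - i
    · have hk' : (j - 1 - (i + 1)).toNat = k - 2 := by omega
      have hlt : k - 2 < k := by omega
      by_cases hne : (PySem.List.pyGet? l i).getD 0 ≠ (PySem.List.pyGet? l j).getD 0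
      · rw [elimLoop_step_ne l i j L R h2 hne, elimLoop_step_ne l i j [] [] h2 hne,
          ih (k - 2) hlt (i + 1) (j - 1) _ _ hk',
          ih (k - 2) hlt (i + 1) (j - 1) ([] ++ [(PySem.List.pyGet? l i).getD 0]) _ hk']
        simp
      · rw [not_not] at hne
        rw [elimLoop_step_eq l i j L R h2 hne, elimLoop_step_eq l i j [] [] h2 hne,
          ih (k - 2) hlt (i + 1) (j - 1) L R hk']
    · rw [elimLoop_stop l i j L R h2, elimLoop_stop l i j [] [] h2]
      simp

theorem elimLoop_bounds (l : List Int) :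
    ∀ (k : Nat) (i j : Int) (L R : List Int), (j - i).toNat = k →
      i ≤ (elimLoop l i j L R).1 ∧ (elimLoop l i j L R).2.1 ≤ j ∧
        (0 ≤ (elimLoop l i j L R).2.1 - (elimLoop l i j L R).1 ∨
          ((elimLoop l i j L R).1 = i ∧ (elimLoop l i j L R).2.1 = j)) := by
  intro k
  induction k using Nat.strong_induction_on with
  | _ k ih =>
    intro i j L R hk
    by_cases h2 : 2 ≤ j - i
    · have hk' : (j - 1 - (i + 1)).toNat = k - 2 := by omega
      have hlt : k - 2 < k := by omega
      by_cases hne : (PySem.List.pyGet? l i).getD 0 ≠ (PySem.List.pyGet? l j).getD 0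
      · rw [elimLoop_step_ne l i j L R h2 hne]
        have := ih (k - 2) hlt (i + 1) (j - 1) (L ++ [(PySem.List.pyGet? l i).getD 0])
          (R ++ [(PySem.List.pyGet? l j).getD 0]) hk'
        omega
      · rw [not_not] at hne
        rw [elimLoop_step_eq l i j L R h2 hne]
        have := ih (k - 2) hlt (i + 1) (j - 1) L R hk'
        omega
    · rw [elimLoop_stop l i j L R h2]
      simp

theorem pyGet?_shift (a b : Int) (m : List Int) (i : Int) (h0 : 0 ≤ i)
    (hlt : i < (m.length : Int)) :
    PySem.List.pyGet? (a :: m ++ [b]) (i + 1) = PySem.List.pyGet? m i := by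
  obtain ⟨iN, rfl⟩ : ∃ k : Nat, i = (k : Int) := ⟨i.toNat, by omega⟩
  have hN : iN < m.length := by exact_mod_cast hlt
  rw [List.cons_append, show ((iN : Int) + 1) = ((iN + 1 : Nat) : Int) by push_cast; ring,
    PySem.List.pyGet?_natCast, PySem.List.pyGet?_natCast]
  simp [List.getElem?_append_left, hN]

theorem elimLoop_shift (a b : Int) (m : List Int) :
    ∀ (k : Nat) (i j : Int) (L R : List Int), (j - i).toNat = k → 0 ≤ i →
      j < (m.length : Int) →
      elimLoop (a :: m ++ [b]) (i + 1) (j + 1) L R =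
        ((elimLoop m i j L R).1 + 1, (elimLoop m i j L R).2.1 + 1,
         (elimLoop m i j L R).2.2.1, (elimLoop m i j L R).2.2.2) := by
  intro k
  induction k using Nat.strong_induction_on with
  | _ k ih =>
    intro i j L R hk hi hj
    by_cases h2 : 2 ≤ j - i
    · have h2' : 2 ≤ (j + 1) - (i + 1) := by omega
      have hgi : PySem.List.pyGet? (a :: m ++ [b]) (i + 1) = PySem.List.pyGet? m i :=
        pyGet?_shift a b m i hi (by omega)
      have hgj : PySem.List.pyGet? (a :: m ++ [b]) (j + 1) = PySem.List.pyGet? m j :=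
        pyGet?_shift a b m j (by omega) hj
      have hk' : (j - 1 - (i + 1)).toNat = k - 2 := by omega
      have hlt : k - 2 < k := by omega
      have harg1 : (i + 1) + 1 = (i + 1) + 1 := rfl
      have harg2 : (j + 1) - 1 = (j - 1) + 1 := by ring
      by_cases hne : (PySem.List.pyGet? m i).getD 0 ≠ (PySem.List.pyGet? m j).getD 0
      · rw [elimLoop_step_ne _ _ _ L R h2' (by rw [hgi, hgj]; exact hne), hgi, hgj, harg2,
          ih (k - 2) hlt (i + 1) (j - 1) _ _ hk' (by omega) (by omega),
          elimLoop_step_ne m i j L R h2 hne]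
      · rw [not_not] at hne
        rw [elimLoop_step_eq _ _ _ L R h2' (by rw [hgi, hgj]; exact hne), harg2,
          ih (k - 2) hlt (i + 1) (j - 1) _ _ hk' (by omega) (by omega),
          elimLoop_step_eq m i j L R h2 hne]
    · have h2' : ¬ 2 ≤ (j + 1) - (i + 1) := by omega
      rw [elimLoop_stop _ _ _ L R h2', elimLoop_stop m i j L R h2]

theorem slice_shift (a b : Int) (m : List Int) (i j : Int) (hi : 0 ≤ i) (hij : i ≤ j + 1)
    (hj : j + 1 ≤ (m.length : Int)) :
    PySem.List.slice (a :: m ++ [b]) (some (i + 1)) (some (j + 2)) =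
      PySem.List.slice m (some i) (some (j + 1)) := by
  rw [PySem.List.slice_toNat _ (by omega) (by omega), PySem.List.slice_toNat _ hi (by omega)]
  have h1 : (i + 1).toNat = i.toNat + 1 := by omega
  have h2 : (j + 2).toNat = (j + 1).toNat + 1 := by omega
  rw [h1, h2]
  simp only [List.cons_append, List.drop_succ_cons]
  rw [List.drop_append_of_le_length (by omega),
    List.take_append_of_le_length (by simp; omega)]
  congr 1
  omega

theorem slice_inner (a b : Int) (m : List Int) :
    PySem.List.slice (a :: m ++ [b]) (some 1) (some (-1)) = m := by
  simp [PySem.List.slice]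

theorem pyGetLast (a b : Int) (m : List Int) :
    PySem.List.pyGet? (a :: m ++ [b]) (-1) = some b := by
  rw [PySem.List.pyGet?_neg_one]
  exact List.getLast?_concat

theorem alt_step (a b : Int) (m : List Int) (hm : m ≠ []) :
    eliminarcapicua_alt (a :: m ++ [b]) =
      if a = b then eliminarcapicua_alt m else a :: eliminarcapicua_alt m ++ [b] := by
  have hmlen : 1 ≤ m.length := by
    cases m with
    | nil => exact absurd rfl hm
    | cons x xs => exact Nat.succ_le_succ (Nat.zero_le _)
  have hlen : ((a :: m ++ [b]).length : Int) - 1 = (m.length : Int) + 1 := by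
    simp
  have h2 : 2 ≤ ((m.length : Int) + 1) - 0 := by omega
  have hga : PySem.List.pyGet? (a :: m ++ [b]) 0 = some a := PySem.List.pyGet?_zero_cons _ _
  have hgb : PySem.List.pyGet? (a :: m ++ [b]) ((m.length : Int) + 1) = some b := by
    have h : ((m.length : Int) + 1) = (((a :: m).length : Int)) := by simp
    rw [h]
    have h2 := PySem.List.pyGet?_append_length (pre := a :: m) (y := b) (ys := ([] : List Int))
    simpa using h2
  have hbounds := elimLoop_bounds m ((((m.length : Int) - 1) - 0).toNat) 0
    ((m.length : Int) - 1) [] [] rfl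
  set r := elimLoop m 0 ((m.length : Int) - 1) [] [] with hr
  have hi0 : 0 ≤ r.1 := hbounds.1
  have hj0 : r.2.1 ≤ (m.length : Int) - 1 := hbounds.2.1
  have hij : r.1 ≤ r.2.1 + 1 := by
    rcases hbounds.2.2 with h | ⟨h1', h2'⟩ <;> omega
  have hslice := slice_shift a b m r.1 r.2.1 hi0 hij (by omega)
  have hshift_eq : ∀ (L R : List Int),
      elimLoop (a :: m ++ [b]) (0 + 1) ((m.length : Int) + 1 - 1) L R =
        ((elimLoop m 0 ((m.length : Int) - 1) L R).1 + 1,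
         (elimLoop m 0 ((m.length : Int) - 1) L R).2.1 + 1,
         (elimLoop m 0 ((m.length : Int) - 1) L R).2.2.1,
         (elimLoop m 0 ((m.length : Int) - 1) L R).2.2.2) := by
    intro L R
    rw [show (m.length : Int) + 1 - 1 = ((m.length : Int) - 1) + 1 by ring]
    exact elimLoop_shift a b m _ 0 _ L R rfl le_rfl (by omega)
  simp only [eliminarcapicua_alt]
  rw [hlen]
  by_cases hab : a = b
  · rw [if_pos hab]
    rw [elimLoop_step_eq _ _ _ _ _ h2 (by rw [hga, hgb]; simp [hab])]
    rw [hshift_eq [] [], ← hr]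
    dsimp only
    rw [show r.2.1 + 1 + 1 = r.2.1 + 2 by ring, hslice]
  · rw [if_neg hab]
    rw [elimLoop_step_ne _ _ _ _ _ h2 (by rw [hga, hgb]; simp [hab])]
    rw [hga, hgb]
    simp only [Option.getD_some, List.nil_append]
    have hacc := elimLoop_acc m ((((m.length : Int) - 1) - 0).toNat) 0 ((m.length : Int) - 1)
      [a] [b] rfl
    rw [hshift_eq [a] [b], hacc, ← hr]
    dsimp only
    rw [show r.2.1 + 1 + 1 = r.2.1 + 2 by ring, hslice]
    simp [List.append_assoc]

theorem hga_aux (a b : Int) (m : List Int) :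
    PySem.List.pyGet? (a :: m ++ [b]) 0 = some a := PySem.List.pyGet?_zero_cons _ _

theorem elim_eq : ∀ (n : Nat) (l : List Int), l.length = n →
    eliminarcapicua l = eliminarcapicua_alt l := by
  intro n
  induction n using Nat.strong_induction_on with
  | _ n ih =>
    intro l hl
    by_cases hn : l.length ≤ 2
    · rw [eliminarcapicua]
      rw [if_pos hn]
      simp only [eliminarcapicua_alt]
      rw [elimLoop_stop _ _ _ _ _ (by omega)]
      dsimp only
      simp only [List.nil_append, List.append_nil, List.reverse_nil]
      rw [show ((l.length : Int) - 1) + 1 = (l.length : Int) by ring]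
      rw [PySem.List.slice_toNat _ le_rfl (by omega)]
      simp
    · -- length ≥ 3: decompose l = a :: m ++ [b]
      obtain ⟨a, rest, rfl⟩ : ∃ a rest, l = a :: rest := by
        cases l with
        | nil => simp at hn
        | cons x xs => exact ⟨x, xs, rfl⟩
      have hrest : rest ≠ [] := by intro h; subst h; simp at hn
      obtain ⟨m, b, rfl⟩ : ∃ m b, rest = m ++ [b] :=
        ⟨rest.dropLast, rest.getLast hrest, (List.dropLast_append_getLast hrest).symm⟩
      have hm : m ≠ [] := by
        intro h; subst h; simp at hn
      show eliminarcapicua (a :: m ++ [b]) = eliminarcapicua_alt (a :: m ++ [b])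
      rw [eliminarcapicua]
      rw [if_neg (by simpa using hn)]
      rw [hga_aux a b m, pyGetLast, slice_inner]
      simp only [Option.getD_some]
      rw [alt_step a b m hm]
      have hmn : m.length < n := by simp at hl; omega
      by_cases hab : a = b
      · rw [if_pos hab, if_pos hab]
        exact ih m.length hmn m rfl
      · rw [if_neg hab, if_neg hab]
        rw [ih m.length hmn m rfl]
        simp

-- ===== VERDICT (by name: the statement is the Claim_ definition above) =====
theorem eliminarcapicua_spec : Claim_equal_eliminarcapicua := by
  intro l _
  unfold Spec_eliminarcapicua
  exact elim_eq l.length l rfl
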